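-- pv_equiv track=rewrite | github.com/Awdrtgg/DB_on_cycle | fp_and_derivatives.py | num_to_pos
-- ===== SOURCE A (Python) =====
-- def num_to_pos(p, q, pq, i):
--     x, a, b = 1, 1, 0
--
--     # get current weight
--     w = 0
--     while (i >= pq[w] and w < len(pq)):
--         i -= pq[w]
--         w += 1
--
--     # get current column
--     while (i >= q[w]):
--         i -= q[w]
--         a += 1
--
--     b = w - a
--     x = i + 1
--
--     return x, a, b
-- ===== SOURCE B (Python) =====
-- def num_to_pos(p, q, pq, i):
--     # Scan running prefix sums to find the block w, then get the column
--     # by a single divmod instead of repeated subtraction.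
--     s = 0
--     w = 0
--     for t in pq:
--         if i < s + t:
--             break
--         s += t
--         w += 1
--     r = i - s
--     c = q[w]
--     if r >= c:
--         k = r // c
--         return r % c + 1, 1 + k, w - 1 - k
--     return r + 1, 1, w - 1
-- ===== Notes on version B (the rewrite author's own statement) =====
-- stated objective: alternative
-- what changed: B finds the block by a single for/break scan over running prefix sums (no index arithmetic, no mutation of i) and replaces A's repeated-subtraction column loop by one divmod.
import Mathlib
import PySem

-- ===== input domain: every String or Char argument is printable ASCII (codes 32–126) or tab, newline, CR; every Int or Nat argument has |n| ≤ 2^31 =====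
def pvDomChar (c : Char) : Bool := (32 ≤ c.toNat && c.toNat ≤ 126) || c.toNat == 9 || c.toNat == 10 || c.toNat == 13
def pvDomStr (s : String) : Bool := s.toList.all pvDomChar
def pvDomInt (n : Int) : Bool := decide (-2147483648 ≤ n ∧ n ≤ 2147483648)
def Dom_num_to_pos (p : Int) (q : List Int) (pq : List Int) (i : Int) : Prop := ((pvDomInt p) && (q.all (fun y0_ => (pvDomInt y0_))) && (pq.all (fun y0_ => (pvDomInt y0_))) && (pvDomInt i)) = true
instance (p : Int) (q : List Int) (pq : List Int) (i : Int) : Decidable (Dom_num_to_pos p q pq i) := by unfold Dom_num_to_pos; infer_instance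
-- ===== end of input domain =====

-- B finds the block by a single for/break scan over running prefix sums and
-- replaces A's repeated-subtraction column loop by one divmod (alternative algorithm).

-- ===== PORT A =====
-- first while loop: while i >= pq[w] and w < len(pq): i -= pq[w]; w += 1
-- (pq[w] raising IndexError is modelled by pyGet? = none; Pre_ excludes it)
def numToPosLoop1 (pq : List Int) (i : Int) (w : Nat) : Int × Nat :=
  match PySem.List.pyGet? pq (w : Int) with
  | none => (i, w)          -- Python raises IndexError here; excluded by Pre_
  | some v =>
    if h : i ≥ v ∧ w < pq.length then numToPosLoop1 pq (i - v) (w + 1) else (i, w)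
termination_by pq.length - w
decreasing_by omega

-- second while loop: while i >= q[w]: i -= q[w]; a += 1   (fuel makes it total;
-- Pre_ guarantees the fuel i.toNat + 1 suffices)
def numToPosLoop2 (c : Int) : Nat → Int → Int → Int × Int
  | 0, i, a => (i, a)
  | fuel + 1, i, a => if i ≥ c then numToPosLoop2 c fuel (i - c) (a + 1) else (i, a)

def num_to_pos (p : Int) (q : List Int) (pq : List Int) (i : Int) : Int × Int × Int :=
  let r := numToPosLoop1 pq i 0
  match PySem.List.pyGet? q (r.2 : Int) with
  | none => (0, 0, 0)       -- Python raises IndexError here; excluded by Pre_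
  | some c =>
    let s := numToPosLoop2 c (r.1.toNat + 1) r.1 1
    (s.1 + 1, s.2, (r.2 : Int) - s.2)

-- ===== PORT B =====
-- for t in pq: if i < s + t: break; s += t; w += 1
def numToPosScan (i : Int) : List Int → Int → Nat → Int × Nat
  | [], s, w => (s, w)
  | t :: rest, s, w => if i < s + t then (s, w) else numToPosScan i rest (s + t) (w + 1)

def num_to_pos_alt (p : Int) (q : List Int) (pq : List Int) (i : Int) : Int × Int × Int :=
  let sw := numToPosScan i pq 0 0
  let r := i - sw.1
  match PySem.List.pyGet? q (sw.2 : Int) with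
  | none => (0, 0, 0)       -- Python raises IndexError here; excluded by Pre_
  | some c =>
    if r ≥ c then
      let k := PySem.Int.floordiv r c
      (PySem.Int.mod r c + 1, 1 + k, (sw.2 : Int) - 1 - k)
    else (r + 1, 1, (sw.2 : Int) - 1)

-- ===== PRECONDITION & SPEC =====
-- Pre_ is exactly the set of inputs where Python A returns: the first loop must
-- stop at some w < len(pq) (otherwise pq[len(pq)] raises IndexError), w must be
-- a valid index of q (otherwise q[w] raises), and the second loop must terminate
-- (immediately, or with a positive divisor q[w]).
def Pre_num_to_pos (p : Int) (q : List Int) (pq : List Int) (i : Int) : Prop :=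
  ∃ w ∈ List.range pq.length,
    (∀ j ∈ List.range w, ((pq.take (j + 1)).sum) ≤ i) ∧
    i < (pq.take (w + 1)).sum ∧
    w < q.length ∧
    (i - (pq.take w).sum < q.getD w 0 ∨ 0 < q.getD w 0)
instance (p : Int) (q : List Int) (pq : List Int) (i : Int) : Decidable (Pre_num_to_pos p q pq i) := by unfold Pre_num_to_pos; infer_instance

def pvWitness_num_to_pos : Int × List Int × List Int × Int := (2, [3, 3], [3, 6], 4)

def Spec_num_to_pos (p : Int) (q : List Int) (pq : List Int) (i : Int) (out : Int × Int × Int) : Prop := out = num_to_pos_alt p q pq i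
instance (p : Int) (q : List Int) (pq : List Int) (i : Int) (out : Int × Int × Int) : Decidable (Spec_num_to_pos p q pq i out) := by unfold Spec_num_to_pos; infer_instance

-- ===== CLAIM (what is proved, stated in full; the proofs are below) =====
def Claim_equal_num_to_pos : Prop := ∀ (p : Int) (q : List Int) (pq : List Int) (i : Int), Dom_num_to_pos p q pq i → Pre_num_to_pos p q pq i → Spec_num_to_pos p q pq i (num_to_pos p q pq i)

-- ===== LEMMAS AND PROOFS =====

-- common specification of the block search: (consumed sum, step count)
def pvWalk : List Int → Int → Int × Nat
  | [], _ => (0, 0)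
  | t :: rest, i =>
    if i < t then (0, 0)
    else ((pvWalk rest (i - t)).1 + t, (pvWalk rest (i - t)).2 + 1)

lemma numToPosLoop1_eq_walk (pq : List Int) :
    ∀ (rest : List Int) (w : Nat) (i : Int), pq.drop w = rest → w ≤ pq.length →
      numToPosLoop1 pq i w = (i - (pvWalk rest i).1, w + (pvWalk rest i).2) := by
  intro rest
  induction rest with
  | nil =>
    intro w i hdrop hw
    have hwl : w = pq.length := by
      have := congrArg List.length hdrop
      simp at this; omega
    rw [numToPosLoop1]
    have : PySem.List.pyGet? pq (w : Int) = none := by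
      simp [PySem.List.pyGet?_natCast, hwl]
    simp [this, pvWalk]
  | cons t rest ih =>
    intro w i hdrop hw
    have hlt : w < pq.length := by
      have := congrArg List.length hdrop
      simp at this; omega
    rw [numToPosLoop1]
    have hpy : PySem.List.pyGet? pq (w : Int) = some t := by
      rw [PySem.List.pyGet?_natCast]
      have h0 : (pq.drop w)[0]? = some t := by rw [hdrop]; rfl
      rw [List.getElem?_drop] at h0; simpa using h0
    rw [hpy]
    by_cases hcond : i ≥ t ∧ w < pq.length
    · simp only [dif_pos hcond]
      have hdrop' : pq.drop (w + 1) = rest := by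
        rw [← List.tail_drop, hdrop]; rfl
      rw [ih (w + 1) (i - t) hdrop' (by omega)]
      rw [pvWalk]
      have hnlt : ¬ i < t := by omega
      simp only [if_neg hnlt, Prod.mk.injEq]
      constructor
      · ring
      · omega
    · simp only [dif_neg hcond]
      have : i < t := by
        rcases not_and_or.mp hcond with h | h
        · omega
        · exact absurd hlt h
      rw [pvWalk]; simp [this]

lemma numToPosScan_eq_walk (i : Int) :
    ∀ (rest : List Int) (s : Int) (w : Nat),
      numToPosScan i rest s w = (s + (pvWalk rest (i - s)).1, w + (pvWalk rest (i - s)).2) := by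
  intro rest
  induction rest with
  | nil => intro s w; simp [numToPosScan, pvWalk]
  | cons t rest ih =>
    intro s w
    rw [numToPosScan, pvWalk]
    by_cases h : i < s + t
    · have : i - s < t := by omega
      simp [h, this]
    · have hn : ¬ i - s < t := by omega
      rw [if_neg h, if_neg hn, ih (s + t) (w + 1)]
      have he : i - (s + t) = i - s - t := by ring
      rw [he]
      simp only [Prod.mk.injEq]
      constructor
      · ring
      · omega

-- under the Pre_ witness conditions, pvWalk stops exactly at w
lemma pvWalk_char : ∀ (pq : List Int) (i : Int) (w : Nat), w < pq.length →
    (∀ j, j < w → ((pq.take (j + 1)).sum) ≤ i) → i < (pq.take (w + 1)).sum →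
    pvWalk pq i = ((pq.take w).sum, w) := by
  intro pq
  induction pq with
  | nil => intro i w hw; simp at hw
  | cons t rest ih =>
    intro i w hw hall hstop
    cases w with
    | zero =>
      have : i < t := by simpa using hstop
      simp [pvWalk, this]
    | succ k =>
      have ht : t ≤ i := by
        have := hall 0 (by omega)
        simpa using this
      have hnlt : ¬ i < t := by omega
      rw [pvWalk, if_neg hnlt]
      have hrec : pvWalk rest (i - t) = ((rest.take k).sum, k) := by
        apply ih (i - t) k (by simpa using hw)
        · intro j hj
          have := hall (j + 1) (by omega)
          simp [List.take_succ_cons, List.sum_cons] at this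
          omega
        · simp [List.take_succ_cons, List.sum_cons] at hstop
          omega
      rw [hrec]
      simp only [List.take_succ_cons, List.sum_cons, Prod.mk.injEq]
      refine ⟨by ring, trivial⟩

-- the second loop computes divmod when the divisor is positive
lemma numToPosLoop2_divmod (c : Int) (hc : 0 < c) :
    ∀ (fuel : Nat) (r a : Int), 0 ≤ r → r < (fuel : Int) →
      numToPosLoop2 c fuel r a = (PySem.Int.mod r c, a + PySem.Int.floordiv r c) := by
  intro fuel
  induction fuel with
  | zero => intro r a h0 h1; simp at h1; omega
  | succ n ih =>
    intro r a h0 h1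
    rw [numToPosLoop2]
    rw [PySem.Int.mod_eq_emod_of_pos hc, PySem.Int.floordiv_eq_ediv_of_pos hc]
    by_cases h : r ≥ c
    · rw [if_pos h, ih (r - c) (a + 1) (by omega) (by push_cast at h1 ⊢; omega)]
      rw [PySem.Int.mod_eq_emod_of_pos hc, PySem.Int.floordiv_eq_ediv_of_pos hc]
      have hdiv : r / c = (r - c) / c + 1 := by
        conv_lhs => rw [show r = (r - c) + 1 * c by ring]
        rw [Int.add_mul_ediv_right _ _ (by omega : c ≠ 0)]
      have hmod : (r - c) % c = r % c := Int.sub_emod_right r c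
      simp only [Prod.mk.injEq]
      constructor
      · exact hmod
      · rw [hdiv]; ring
    · rw [if_neg h]
      have h2 : r % c = r := Int.emod_eq_of_lt h0 (by omega)
      have h3 : r / c = 0 := Int.ediv_eq_zero_of_lt h0 (by omega)
      rw [h2, h3]; simp

-- ===== VERDICT (by name: the statement is the Claim_ definition above) =====
theorem num_to_pos_spec : Claim_equal_num_to_pos := by
  intro p q pq i _ hpre
  unfold Spec_num_to_pos
  obtain ⟨w, hwmem, hall, hstop, hwq, hterm⟩ := hpre
  have hw : w < pq.length := List.mem_range.mp hwmem
  have hall' : ∀ j, j < w → ((pq.take (j + 1)).sum) ≤ i := by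
    intro j hj; exact hall j (List.mem_range.mpr hj)
  have hwalk := pvWalk_char pq i w hw hall' hstop
  have hA1 : numToPosLoop1 pq i 0 = (i - (pq.take w).sum, w) := by
    have h := numToPosLoop1_eq_walk pq pq 0 i (by simp) (by omega)
    rw [hwalk] at h; simpa using h
  have hB1 : numToPosScan i pq 0 0 = ((pq.take w).sum, w) := by
    have h := numToPosScan_eq_walk i pq 0 0
    rw [show i - 0 = i by ring, hwalk] at h
    simpa using h
  have hgd : q.getD w 0 = q[w] := List.getD_eq_getElem q 0 hwq
  have hpy : PySem.List.pyGet? q ((w : Nat) : Int) = some q[w] := by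
    rw [PySem.List.pyGet?_natCast]
    exact List.getElem?_eq_getElem hwq
  unfold num_to_pos num_to_pos_alt
  rw [hA1, hB1]
  simp only [hpy]
  set r := i - (pq.take w).sum with hr
  set c := q[w] with hcdef
  by_cases hge : r ≥ c
  · have hc : 0 < c := by
      rcases hterm with h | h
      · rw [hgd] at h; omega
      · rw [hgd] at h; exact h
    have h0r : 0 ≤ r := by omega
    rw [numToPosLoop2_divmod c hc (r.toNat + 1) r 1 h0r (by push_cast; omega)]
    rw [if_pos hge]
    simp only [Prod.mk.injEq]
    refine ⟨trivial, trivial, by ring⟩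
  · rw [if_neg hge]
    have : numToPosLoop2 c (r.toNat + 1) r 1 = (r, 1) := by
      rw [numToPosLoop2, if_neg hge]
    rw [this]
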